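-- pv_equiv track=rewrite | github.com/Preetam3620/HomeEase | fetch-agents/yelp_client.py | _is_hardware_store
-- ===== SOURCE A (Python) =====
-- from typing import List, Dict, Optional
--
-- def _is_hardware_store(business: Dict) -> bool:
--     """Check if a business is a hardware store based on categories."""
--     categories = business.get("categories", [])
--     hardware_keywords = [
--         "hardware", "home improvement", "building supplies",
--         "tools", "lumber", "electrical", "plumbing", "paint"
--     ]
--
--     for category in categories:
--         category_title = category.get("title", "").lower()
--         if any(keyword in category_title for keyword in hardware_keywords):
--             return True
--
--     return False
-- ===== SOURCE B (Python) =====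
-- def _is_hardware_store(business) -> bool:
--     """Check if a business is a hardware store based on categories."""
--     hardware_keywords = [
--         "hardware", "home improvement", "building supplies",
--         "tools", "lumber", "electrical", "plumbing", "paint"
--     ]
--     # Build one combined blob of all lowered titles, joined by '\n'
--     # (no keyword contains '\n'), then scan the keyword list once.
--     combined = "\n".join(
--         category.get("title", "").lower()
--         for category in business.get("categories", [])
--     )
--     return any(keyword in combined for keyword in hardware_keywords)
-- ===== Notes on version B (the rewrite author's own statement) =====
-- stated objective: alternative
-- what changed: Instead of scanning each category title against all keywords inside the loop with an early return, B first joins all lowered titles into one '\n'-separated blob and then makes a single pass over the keyword list testing substring membership in the blob.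
import Mathlib
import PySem

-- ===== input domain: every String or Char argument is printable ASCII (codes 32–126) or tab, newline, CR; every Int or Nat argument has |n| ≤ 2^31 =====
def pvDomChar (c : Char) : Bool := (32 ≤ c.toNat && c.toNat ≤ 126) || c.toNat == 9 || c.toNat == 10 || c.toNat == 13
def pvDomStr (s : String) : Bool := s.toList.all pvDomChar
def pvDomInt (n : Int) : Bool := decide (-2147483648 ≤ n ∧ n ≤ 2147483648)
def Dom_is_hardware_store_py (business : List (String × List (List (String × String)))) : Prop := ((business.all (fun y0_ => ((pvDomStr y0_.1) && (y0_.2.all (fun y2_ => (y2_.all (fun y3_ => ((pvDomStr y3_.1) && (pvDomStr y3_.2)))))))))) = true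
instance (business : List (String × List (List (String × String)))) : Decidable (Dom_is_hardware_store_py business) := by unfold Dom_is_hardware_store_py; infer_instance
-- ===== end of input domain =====

-- B replaces the per-category keyword scan with one '\n'-joined blob of all
-- lowered titles scanned once per keyword (alternative decomposition, same cost class).

-- ===== PORT A =====
def pvHardwareKeywords : List String :=
  ["hardware", "home improvement", "building supplies",
   "tools", "lumber", "electrical", "plumbing", "paint"]

-- the 'for category in categories' loop with its early return
def pvALoop : List (List (String × String)) → Bool
  | [] => false
  | cat :: rest =>
    let category_title := PySem.Str.lower (PySem.Dict.getD (PySem.Dict.mk cat) "title" "")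
    if pvHardwareKeywords.any (fun kw => PySem.Str.isIn kw category_title) then true
    else pvALoop rest

def is_hardware_store_py (business : List (String × List (List (String × String)))) : Bool :=
  let categories := PySem.Dict.getD (PySem.Dict.mk business) "categories" []
  pvALoop categories

-- ===== PORT B =====
def is_hardware_store_py_alt (business : List (String × List (List (String × String)))) : Bool :=
  let combined := PySem.Str.join "\n"
    ((PySem.Dict.getD (PySem.Dict.mk business) "categories" []).map
      (fun category => PySem.Str.lower (PySem.Dict.getD (PySem.Dict.mk category) "title" "")))
  pvHardwareKeywords.any (fun keyword => PySem.Str.isIn keyword combined)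

-- ===== PRECONDITION & SPEC =====
def Spec_is_hardware_store_py (business : List (String × List (List (String × String)))) (out : Bool) : Prop := out = is_hardware_store_py_alt business
instance (business : List (String × List (List (String × String)))) (out : Bool) : Decidable (Spec_is_hardware_store_py business out) := by unfold Spec_is_hardware_store_py; infer_instance

-- ===== CLAIM (what is proved, stated in full; the proofs are below) =====
def Claim_equal_is_hardware_store_py : Prop := ∀ (business : List (String × List (List (String × String)))), Dom_is_hardware_store_py business → Spec_is_hardware_store_py business (is_hardware_store_py business)

-- ===== LEMMAS AND PROOFS =====

-- an occurrence of kw in xs ++ c :: ys avoiding c lies in xs or in ys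
theorem pv_infix_split {c : Char} {kw xs ys : List Char}
    (hc : c ∉ kw) (h : kw <:+: xs ++ c :: ys) : kw <:+: xs ∨ kw <:+: ys := by
  obtain ⟨p, s, hps⟩ := h
  by_cases h1 : p.length + kw.length ≤ xs.length
  · left
    have hpre : kw <+: (xs ++ c :: ys).drop p.length := by
      rw [← hps]; simp [List.drop_left']
    have hdrop : (xs ++ c :: ys).drop p.length = xs.drop p.length ++ c :: ys := by
      rw [List.drop_append_of_le_length (by omega)]
    rw [hdrop] at hpre
    have hkw : kw = (xs.drop p.length ++ c :: ys).take kw.length :=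
      List.prefix_iff_eq_take.mp hpre
    have hlen : kw.length ≤ (xs.drop p.length).length := by
      simp; omega
    rw [List.take_append_of_le_length hlen] at hkw
    have hkw' : kw <+: xs.drop p.length := hkw ▸ List.take_prefix kw.length (xs.drop p.length)
    exact hkw'.isInfix.trans (List.drop_suffix p.length xs).isInfix
  · by_cases h2 : xs.length + 1 ≤ p.length
    · right
      have hpre : kw <+: (xs ++ c :: ys).drop p.length := by
        rw [← hps]; simp [List.drop_left']
      have hsplit : xs ++ c :: ys = (xs ++ [c]) ++ ys := by simp
      have hdrop : (xs ++ c :: ys).drop p.length = ys.drop (p.length - (xs.length + 1)) := by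
        rw [hsplit, List.drop_append]
        rw [List.drop_eq_nil_of_le (by simp; omega), List.nil_append]
        congr 1
        simp
      rw [hdrop] at hpre
      exact hpre.isInfix.trans (List.drop_suffix _ ys).isInfix
    · exfalso
      -- p.length ≤ xs.length < p.length + kw.length : c falls inside kw
      have hlen : (p ++ kw ++ s).length = (xs ++ c :: ys).length := by rw [hps]
      simp at hlen
      have hidx : (xs ++ c :: ys)[xs.length]'(by simp) = c := by
        rw [List.getElem_append_right (le_refl xs.length)]
        simp
      have hb : xs.length < (p ++ kw ++ s).length := by simp; omega
      have hidx2 : (p ++ kw ++ s)[xs.length]'hb = kw[xs.length - p.length]'(by omega) := by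
        rw [List.getElem_append_left (by simp; omega)]
        rw [List.getElem_append_right (by omega)]
      have heq : (p ++ kw ++ s)[xs.length]'hb = (xs ++ c :: ys)[xs.length]'(by simp) :=
        List.getElem_of_eq hps _
      have : kw[xs.length - p.length]'(by omega) = c := by
        rw [← hidx2, heq, hidx]
      exact hc (this ▸ List.getElem_mem _)

-- kw without '\n' is a substring of the '\n'-join iff it is a substring of some part
theorem pv_infix_join (kw : List Char) (hne : kw ≠ []) (hc : ('\n' : Char) ∉ kw) :
    ∀ ts : List (List Char),
      (kw <:+: PySem.Chars.join ['\n'] ts ↔ ∃ t ∈ ts, kw <:+: t)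
  | [] => by
    simp [PySem.Chars.join_nil, List.infix_nil, hne]
  | [t] => by
    simp [PySem.Chars.join_singleton]
  | a :: b :: rest => by
    rw [PySem.Chars.join_cons_cons]
    constructor
    · intro h
      have h' : kw <:+: a ++ '\n' :: PySem.Chars.join ['\n'] (b :: rest) := by
        simpa using h
      rcases pv_infix_split hc h' with h1 | h2
      · exact ⟨a, by simp, h1⟩
      · obtain ⟨t, ht, hkt⟩ := (pv_infix_join kw hne hc (b :: rest)).mp h2
        exact ⟨t, List.mem_cons_of_mem a ht, hkt⟩
    · rintro ⟨t, ht, hkt⟩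
      rcases List.mem_cons.mp ht with rfl | ht'
      · exact hkt.trans (by
          simpa [List.append_assoc] using
            (List.prefix_append t (['\n'] ++ PySem.Chars.join ['\n'] (b :: rest))).isInfix)
      · have hj : kw <:+: PySem.Chars.join ['\n'] (b :: rest) :=
          (pv_infix_join kw hne hc (b :: rest)).mpr ⟨t, ht', hkt⟩
        exact hj.trans (List.suffix_append (a ++ ['\n']) _).isInfix

-- for every keyword in the list: membership in the blob = membership in some title
theorem pv_isIn_join_titles (kw : String) (hkw : kw ∈ pvHardwareKeywords) (titles : List String) :
    PySem.Str.isIn kw (PySem.Str.join "\n" titles)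
      = titles.any (fun t => PySem.Str.isIn kw t) := by
  have hne : kw.toList ≠ [] := by fin_cases hkw <;> decide
  have hc : ('\n' : Char) ∉ kw.toList := by fin_cases hkw <;> decide
  rw [Bool.eq_iff_iff, PySem.Str.isIn_iff_infix, PySem.Str.toList_join]
  have h1 : ("\n" : String).toList = ['\n'] := by decide
  rw [h1, pv_infix_join kw.toList hne hc]
  simp [List.any_eq_true, PySem.Chars.isIn_iff_infix]

theorem pv_any_congr {α : Type} (l : List α) (f g : α → Bool)
    (h : ∀ x ∈ l, f x = g x) : l.any f = l.any g := by
  induction l with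
  | nil => rfl
  | cons a t ih => simp only [List.any_cons, h a (by simp), ih (fun x hx => h x (by simp [hx]))]

theorem pvALoop_eq_any (cats : List (List (String × String))) :
    pvALoop cats = cats.any (fun cat =>
      pvHardwareKeywords.any (fun kw =>
        PySem.Str.isIn kw (PySem.Str.lower (PySem.Dict.getD (PySem.Dict.mk cat) "title" "")))) := by
  induction cats with
  | nil => rfl
  | cons c t ih =>
    simp only [pvALoop, List.any_cons, ih]
    split <;> simp_all

-- ===== VERDICT (by name: the statement is the Claim_ definition above) =====
theorem is_hardware_store_py_spec : Claim_equal_is_hardware_store_py := by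
  intro business _
  unfold Spec_is_hardware_store_py is_hardware_store_py is_hardware_store_py_alt
  rw [pvALoop_eq_any]
  rw [pv_any_congr _ _ _ (fun kw hkw => pv_isIn_join_titles kw hkw _)]
  rw [Bool.eq_iff_iff]
  simp only [List.any_eq_true, List.any_map, Function.comp]
  tauto
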